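-- pv_equiv track=rewrite | github.com/kbnetz/SMILESanalysis | SMILES Analyzer Finalized.py | get_ring_pairs
-- ===== SOURCE A (Python) =====
-- def get_ring_indexes(abbrev_SMILES):
--     ring_indexes = []
--     for index, character in enumerate(abbrev_SMILES):
--         try:
--             intcheck = int(character)
--             ring_indexes.append(index)
--         except:
--             pass
--     return ring_indexes
--
-- def get_ring_pairs(abbrev_SMILES):
--     ring_indexes = get_ring_indexes(abbrev_SMILES)
--     ring_pairs = []
--     for k in range(len(abbrev_SMILES)):
--         for l in range(len(abbrev_SMILES)):
--             if k in ring_indexes and l in ring_indexes and k != l: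
--                 if abbrev_SMILES[k] == abbrev_SMILES[l]:
--                     ring_pairs.append([k,l])
--                     ring_indexes.remove(k) # removing k and l prevents double-counting of ring pairs in this function
--                     ring_indexes.remove(l)
--     return ring_pairs
-- ===== SOURCE B (Python) =====
-- def get_ring_pairs(abbrev_SMILES):
--     pending = {}   # digit char -> opening index awaiting its partner
--     partner = {}   # opening index -> closing index
--     for i, ch in enumerate(abbrev_SMILES):
--         if ch.isdigit():
--             if ch in pending:
--                 partner[pending.pop(ch)] = i
--             else:
--                 pending[ch] = i
--     return [[i, partner[i]] for i in range(len(abbrev_SMILES)) if i in partner]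
-- ===== Notes on version B (the rewrite author's own statement) =====
-- stated objective: faster
-- what changed: Replaced A's quadratic double scan (with an O(n) membership test and list.remove inside) over all index pairs by a single pass keeping one pending opening index per digit, building an opener-to-closer map, read off in index order.
import Mathlib
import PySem

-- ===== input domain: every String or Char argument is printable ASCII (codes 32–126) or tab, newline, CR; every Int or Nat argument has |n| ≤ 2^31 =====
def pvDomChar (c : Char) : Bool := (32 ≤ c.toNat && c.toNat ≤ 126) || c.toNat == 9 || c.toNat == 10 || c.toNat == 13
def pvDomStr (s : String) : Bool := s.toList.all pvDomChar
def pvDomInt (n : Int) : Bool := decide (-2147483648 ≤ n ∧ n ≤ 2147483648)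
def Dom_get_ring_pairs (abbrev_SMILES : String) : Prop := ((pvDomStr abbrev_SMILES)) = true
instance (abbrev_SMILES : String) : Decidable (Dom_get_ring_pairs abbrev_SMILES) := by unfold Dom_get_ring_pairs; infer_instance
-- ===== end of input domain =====

-- B replaces A's triply-nested membership/removal scan by one linear pass that pairs each
-- ring-closure digit with its pending same-digit opener, then lists the pairs by opening index.

-- ===== PORT A =====
-- try: int(character); ring_indexes.append(index); except: pass
def get_ring_indexes (abbrev_SMILES : String) : List Int :=
  (PySem.List.enumerate abbrev_SMILES.toList).foldl
    (fun acc ic =>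
      match PySem.Int.ofStr? (String.ofList [ic.2]) with
      | some _ => acc ++ [ic.1]
      | none => acc) []

def get_ring_pairs (abbrev_SMILES : String) : List (List Int) :=
  let n : Int := PySem.Str.len abbrev_SMILES
  let st :=
    (PySem.List.pyRange 0 n 1).foldl (fun st k =>
      (PySem.List.pyRange 0 n 1).foldl (fun st l =>
        if k ∈ st.1 ∧ l ∈ st.1 ∧ k ≠ l then
          if PySem.Str.pyGet? abbrev_SMILES k = PySem.Str.pyGet? abbrev_SMILES l then
            -- list.remove cannot raise here: membership was just checked, so getD is never taken
            (((PySem.List.remove? st.1 k).getD st.1 |> fun r => (PySem.List.remove? r l).getD r),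
             st.2 ++ [[k, l]])
          else st
        else st) st) (get_ring_indexes abbrev_SMILES, ([] : List (List Int)))
  st.2

-- ===== PORT B =====
def get_ring_pairs_alt (abbrev_SMILES : String) : List (List Int) :=
  let st :=
    (PySem.List.enumerate abbrev_SMILES.toList).foldl
      (fun st ic =>
        if PySem.Str.strIsdigit (String.ofList [ic.2]) then
          match PySem.Dict.get? st.1 ic.2 with
          | some p => (PySem.Dict.erase st.1 ic.2, PySem.Dict.insert st.2 p ic.1)
          | none => (PySem.Dict.insert st.1 ic.2 ic.1, st.2)
        else st)
      ((PySem.Dict.empty : PySem.Dict Char Int), (PySem.Dict.empty : PySem.Dict Int Int))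
  (PySem.List.pyRange 0 (PySem.Str.len abbrev_SMILES) 1).foldl
    (fun acc i =>
      match PySem.Dict.get? st.2 i with
      | some j => acc ++ [[i, j]]
      | none => acc) []

-- ===== PRECONDITION & SPEC =====
def Spec_get_ring_pairs (abbrev_SMILES : String) (out : List (List Int)) : Prop := out = get_ring_pairs_alt abbrev_SMILES
instance (abbrev_SMILES : String) (out : List (List Int)) : Decidable (Spec_get_ring_pairs abbrev_SMILES out) := by unfold Spec_get_ring_pairs; infer_instance

-- ===== CLAIM (what is proved, stated in full; the proofs are below) =====
def Claim_equal_get_ring_pairs : Prop := ∀ (abbrev_SMILES : String), Dom_get_ring_pairs abbrev_SMILES → Spec_get_ring_pairs abbrev_SMILES (get_ring_pairs abbrev_SMILES)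

-- ===== LEMMAS AND PROOFS =====

-- ---------- model: characters, ranks, next/previous same-digit occurrence ----------

def chD (cs : List Char) (i : Nat) : Char := cs.getD i ' '
def dg (c : Char) : Bool := decide ('0' ≤ c ∧ c ≤ '9')
def nxt (cs : List Char) (i : Nat) : Option Nat :=
  (List.range cs.length).find? (fun j => decide (i < j) && (chD cs j == chD cs i))
def rnk (cs : List Char) (i : Nat) : Nat := (List.range i).countP (fun j => chD cs j == chD cs i)
def opn (cs : List Char) (i : Nat) : Bool :=
  dg (chD cs i) && (rnk cs i % 2 == 0) && (nxt cs i).isSome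
def prv (cs : List Char) (j : Nat) : Nat := Nat.findGreatest (fun o => chD cs o = chD cs j) (j-1)
def pairAt (cs : List Char) (i : Nat) : Option (List Int) :=
  if opn cs i then some [(i:Int), (((nxt cs i).getD 0 : Nat) : Int)] else none
def specFrom (cs : List Char) (k : Nat) : List (List Int) :=
  (List.range' k (cs.length - k)).filterMap (pairAt cs)
def consumed (cs : List Char) (k i : Nat) : Bool :=
  (List.range k).any (fun o => opn cs o && (o == i || nxt cs o == some i))
def RstN (cs : List Char) (k : Nat) : List Nat :=
  (List.range cs.length).filter (fun i => dg (chD cs i) && !consumed cs k i)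
def Rst (cs : List Char) (k : Nat) : List Int := (RstN cs k).map (fun i => ((i:Nat):Int))
def pend (cs : List Char) (m i : Nat) : Bool :=
  dg (chD cs i) && (rnk cs i % 2 == 0) && ((nxt cs i).all (fun j => decide (m ≤ j)))
def pndItems (cs : List Char) (m : Nat) : List (Char × Int) :=
  ((List.range m).filter (pend cs m)).map (fun i => (chD cs i, ((i:Nat):Int)))
def ptnItems (cs : List Char) (m : Nat) : List (Int × Int) :=
  ((List.range m).filter (fun j => dg (chD cs j) && (rnk cs j % 2 == 1))).map
    (fun j => (((prv cs j : Nat) : Int), ((j:Nat):Int)))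

-- ---------- generic helpers ----------

lemma find?_range_some {n j : Nat} {p : Nat → Bool} :
    (List.range n).find? p = some j ↔ j < n ∧ p j = true ∧ ∀ m < j, p m = false := by
  induction n generalizing j with
  | zero => simp
  | succ n ih =>
    rw [List.range_succ, List.find?_append]
    rcases h : (List.range n).find? p with _ | j'
    · have hn := List.find?_eq_none.mp h
      simp only [Option.none_or]
      constructor
      · intro hf
        rcases List.find?_some hf with hp
        have : j = n := by
          rcases List.find?_eq_some_iff_append.mp hf with ⟨_, ⟨as, bs, h1, _⟩⟩
          cases as <;> simp_all
        subst this
        exact ⟨by omega, hp, fun m hm => by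
          have := hn m (by simp; omega); simpa using this⟩
      · intro ⟨h1, h2, h3⟩
        have : j = n := by
          by_contra hne
          have := hn j (by simp; omega)
          simp [h2] at this
        subst this; simp [h2]
    · simp only [Option.some_or]
      rw [@ih j'] at h
      constructor
      · intro he
        rcases Option.some_inj.mp he with rfl
        exact ⟨by omega, h.2.1, h.2.2⟩
      · intro ⟨h1, h2, h3⟩
        rcases Nat.lt_trichotomy j j' with hlt | rfl | hgt
        · exact absurd h2 (by simp [h.2.2 _ hlt])
        · rfl
        · exact absurd h.2.1 (by simp [h3 _ hgt])

lemma get?_chD {cs : List Char} {i : Nat} (h : i < cs.length) : cs[i]? = some (chD cs i) := by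
  rw [List.getElem?_eq_getElem h]
  simp [chD, List.getD, List.getElem?_eq_getElem h]

lemma remove?_getD {R : List Int} {a : Int} : (PySem.List.remove? R a).getD R = R.erase a := by
  rw [List.erase_eq_eraseIdx]
  cases h : List.idxOf? a R <;> simp [PySem.List.remove?, h]

lemma filterMap_eq_foldl_toList {α β : Type} (f : α → Option β) (l : List α) (acc : List β) :
    l.foldl (fun acc i => acc ++ (f i).toList) acc = acc ++ l.filterMap f := by
  induction l generalizing acc with
  | nil => simp
  | cons x xs ih => cases h : f x <;> simp [List.foldl_cons, ih, h]

-- ---------- digit-test lemmas (exact on the ASCII domain) ----------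

lemma digA {c : Char} (h : pvDomChar c = true) :
    (PySem.Int.ofStr? (String.ofList [c])).isSome = dg c := by
  have hlt : c.toNat < 127 := by
    simp only [pvDomChar, Bool.or_eq_true, Bool.and_eq_true, decide_eq_true_eq, beq_iff_eq] at h
    omega
  have key : ∀ m : Nat, m < 127 →
      ((PySem.Int.ofStr? (String.ofList [Char.ofNat m])).isSome =
        decide ('0' ≤ Char.ofNat m ∧ Char.ofNat m ≤ '9')) := by decide
  have := key c.toNat hlt
  rwa [Char.ofNat_toNat] at this

lemma digB {c : Char} (h : pvDomChar c = true) :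
    PySem.Str.strIsdigit (String.ofList [c]) = dg c := by
  have hlt : c.toNat < 127 := by
    simp only [pvDomChar, Bool.or_eq_true, Bool.and_eq_true, decide_eq_true_eq, beq_iff_eq] at h
    omega
  have key : ∀ m : Nat, m < 127 →
      ((PySem.Str.strIsdigit (String.ofList [Char.ofNat m])) =
        decide ('0' ≤ Char.ofNat m ∧ Char.ofNat m ≤ '9')) := by decide
  have := key c.toNat hlt
  rwa [Char.ofNat_toNat] at this

lemma domChD {s : String} (h : pvDomStr s = true) (i : Nat) : pvDomChar (chD s.toList i) = true := by
  unfold chD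
  rcases hlt : s.toList[i]? with _ | c
  · simp [List.getD, hlt]; decide
  · have hm : c ∈ s.toList := List.mem_of_getElem? hlt
    have := (List.all_eq_true.mp h) c hm
    simpa [List.getD, hlt] using this

-- ---------- occurrence structure ----------

lemma nxt_some {cs : List Char} {i j : Nat} (h : nxt cs i = some j) :
    i < j ∧ j < cs.length ∧ chD cs j = chD cs i ∧ ∀ m, i < m → m < j → chD cs m ≠ chD cs i := by
  rcases find?_range_some.mp h with ⟨hjn, hpj, hmin⟩
  simp only [Bool.and_eq_true, decide_eq_true_eq, beq_iff_eq] at hpj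
  refine ⟨hpj.1, hjn, hpj.2, fun m him hmj hcm => ?_⟩
  have := hmin m hmj
  simp [him, hcm] at this

lemma nxt_none {cs : List Char} {i : Nat} (h : nxt cs i = none) :
    ∀ j < cs.length, i < j → chD cs j ≠ chD cs i := by
  intro j hj hij hc
  have := List.find?_eq_none.mp h j (List.mem_range.mpr hj)
  simp [hij, hc] at this

lemma nxt_eq_some {cs : List Char} {i j : Nat} (hj : j < cs.length) (hij : i < j)
    (hc : chD cs j = chD cs i) (hmin : ∀ m, i < m → m < j → chD cs m ≠ chD cs i) :
    nxt cs i = some j := by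
  apply find?_range_some.mpr
  refine ⟨hj, by simp [hij, hc], fun m hm => ?_⟩
  by_cases him : i < m
  · simp [hmin m him hm]
  · simp [him]

lemma nxt_isSome_of_exists {cs : List Char} {i j : Nat} (hj : j < cs.length) (hij : i < j)
    (hc : chD cs j = chD cs i) : (nxt cs i).isSome := by
  cases h : nxt cs i with
  | none => exact absurd hc (nxt_none h j hj hij)
  | some c => simp

lemma rnk_succ_of_nxt {cs : List Char} {i j : Nat} (h : nxt cs i = some j) :
    rnk cs j = rnk cs i + 1 := by
  rcases nxt_some h with ⟨hij, hjn, hc, hmin⟩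
  unfold rnk
  have hpe : (fun m => chD cs m == chD cs j) = (fun m => chD cs m == chD cs i) := by
    funext m; rw [hc]
  rw [hpe]
  have hsplit : j = (i+1) + (j-i-1) := by omega
  rw [hsplit, List.range_add, List.countP_append, List.range_succ, List.countP_append]
  have h2 : (List.countP (fun m => chD cs m == chD cs i)
      (List.map (fun x => i + 1 + x) (List.range (j - i - 1)))) = 0 := by
    rw [List.countP_eq_zero]
    intro a ha
    rcases List.mem_map.mp ha with ⟨x, hx, rfl⟩
    have hxr := List.mem_range.mp hx
    simp only [beq_iff_eq]
    exact hmin _ (by omega) (by omega)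
  rw [h2]
  simp

lemma prv_spec {cs : List Char} {j : Nat} (h0 : 0 < rnk cs j) :
    prv cs j < j ∧ chD cs (prv cs j) = chD cs j ∧
      ∀ m, prv cs j < m → m < j → chD cs m ≠ chD cs j := by
  have hpd : prv cs j = Nat.findGreatest (fun o => chD cs o = chD cs j) (j-1) := rfl
  have hex : ∃ o, o < j ∧ chD cs o = chD cs j := by
    by_contra hno
    push Not at hno
    have : rnk cs j = 0 := by
      unfold rnk
      rw [List.countP_eq_zero]
      intro a ha
      simp only [beq_iff_eq]
      exact hno a (List.mem_range.mp ha)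
    omega
  rcases hex with ⟨o, hoj, hoc⟩
  have hj0 : 0 < j := by omega
  have hp : chD cs (prv cs j) = chD cs j := by
    rw [hpd]; exact Nat.findGreatest_spec (P := fun o => chD cs o = chD cs j) (m := o) (n := j-1) (by omega) hoc
  have hle : prv cs j ≤ j - 1 := by rw [hpd]; exact Nat.findGreatest_le _
  refine ⟨by omega, hp, fun m hm1 hm2 hcm => ?_⟩
  rw [hpd] at hm1
  exact Nat.findGreatest_is_greatest hm1 (by omega) hcm

lemma nxt_prv {cs : List Char} {j : Nat} (hj : j < cs.length) (h0 : 0 < rnk cs j) :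
    nxt cs (prv cs j) = some j := by
  rcases prv_spec h0 with ⟨h1, h2, h3⟩
  apply nxt_eq_some hj h1 h2.symm
  intro m hm1 hm2 hcm
  rw [h2] at hcm
  exact h3 m hm1 hm2 hcm

lemma prv_nxt {cs : List Char} {i j : Nat} (h : nxt cs i = some j) : prv cs j = i := by
  have hpd : prv cs j = Nat.findGreatest (fun o => chD cs o = chD cs j) (j-1) := rfl
  rcases nxt_some h with ⟨hij, hjn, hc, hmin⟩
  have hile : i ≤ prv cs j := by
    rw [hpd]; exact Nat.le_findGreatest (P := fun o => chD cs o = chD cs j) (by omega) hc.symm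
  have hle : prv cs j ≤ j - 1 := by rw [hpd]; exact Nat.findGreatest_le _
  rcases Nat.eq_or_lt_of_le hile with he | hlt
  · omega
  · have hp : chD cs (prv cs j) = chD cs j := by
      rw [hpd]; exact Nat.findGreatest_spec (P := fun o => chD cs o = chD cs j) (m := i) (n := j-1) (by omega) hc.symm
    exact absurd (hp.trans hc) (hmin _ hlt (by omega))

lemma rnk_pos_of_odd {cs : List Char} {j : Nat} (h : rnk cs j % 2 = 1) : 0 < rnk cs j := by
  omega

-- ---------- consumed characterisation ----------

lemma consumed_iff {cs : List Char} {k i : Nat} :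
    consumed cs k i = true ↔ ∃ o < k, opn cs o = true ∧ (o = i ∨ nxt cs o = some i) := by
  simp [consumed, List.any_eq_true, List.mem_range]

lemma consumed_succ {cs : List Char} {k i : Nat} :
    consumed cs (k+1) i = (consumed cs k i || (opn cs k && (k == i || nxt cs k == some i))) := by
  simp [consumed, List.range_succ]

lemma consumed_char {cs : List Char} {k i : Nat} (hi : i < cs.length) :
    consumed cs k i = true ↔
      (if rnk cs i % 2 = 0 then (dg (chD cs i) = true ∧ i < k ∧ (nxt cs i).isSome = true)
       else (dg (chD cs i) = true ∧ prv cs i < k)) := by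
  constructor
  · intro hcon
    rcases consumed_iff.mp hcon with ⟨o, hok, hopn, ho⟩
    have hopn' : dg (chD cs o) = true ∧ rnk cs o % 2 = 0 ∧ (nxt cs o).isSome = true := by
      unfold opn at hopn
      simp at hopn
      exact ⟨hopn.1.1, hopn.1.2, hopn.2⟩
    rcases ho with rfl | hno
    · rw [if_pos hopn'.2.1]
      exact ⟨hopn'.1, hok, hopn'.2.2⟩
    · have hr := rnk_succ_of_nxt hno
      have hch : chD cs i = chD cs o := (nxt_some hno).2.2.1
      rw [if_neg (by omega)]
      refine ⟨by rw [hch]; exact hopn'.1, ?_⟩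
      rw [prv_nxt hno]
      exact hok
  · split_ifs with hpar
    · rintro ⟨hdg, hik, hsome⟩
      exact consumed_iff.mpr ⟨i, hik, by unfold opn; simp [hdg, hpar, hsome], Or.inl rfl⟩
    · rintro ⟨hdg, hpk⟩
      have hodd : rnk cs i % 2 = 1 := by omega
      have h0 := rnk_pos_of_odd hodd
      have hnp := nxt_prv hi h0
      have hrs := rnk_succ_of_nxt hnp
      refine consumed_iff.mpr ⟨prv cs i, hpk, ?_, Or.inr hnp⟩
      unfold opn
      have hch := (prv_spec h0).2.1
      simp [hch, hdg, hnp]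
      omega

lemma mem_RstN {cs : List Char} {k i : Nat} :
    i ∈ RstN cs k ↔ i < cs.length ∧ dg (chD cs i) = true ∧ consumed cs k i = false := by
  simp [RstN, List.mem_filter, List.mem_range]

lemma mem_Rst {cs : List Char} {k : Nat} {x : Int} :
    x ∈ Rst cs k ↔ ∃ i : Nat, x = (i : Int) ∧ i ∈ RstN cs k := by
  constructor
  · intro hx
    rcases List.mem_map.mp hx with ⟨i, hi, rfl⟩
    exact ⟨i, rfl, hi⟩
  · rintro ⟨i, rfl, hi⟩
    exact List.mem_map.mpr ⟨i, hi, rfl⟩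

lemma nodup_Rst {cs : List Char} {k : Nat} : (Rst cs k).Nodup := by
  apply List.Nodup.map (fun a b h => by exact_mod_cast h)
  exact (List.nodup_range).filter _

-- in-range same-char survivors at step k with k itself unconsumed: exactly k and nxt k
lemma survivor_lt {cs : List Char} {k l : Nat} (hk : k < cs.length) (hdg : dg (chD cs k) = true)
    (hnc : consumed cs k k = false) (hl : l < k) (hc : chD cs l = chD cs k) :
    consumed cs k l = true := by
  have hln : l < cs.length := by omega
  have hdgl : dg (chD cs l) = true := by rw [hc]; exact hdg
  rw [consumed_char hln]
  split_ifs with hpar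
  · exact ⟨hdgl, hl, nxt_isSome_of_exists hk hl (hc.symm)⟩
  · have h0 := rnk_pos_of_odd (cs := cs) (j := l) (by omega)
    exact ⟨hdgl, by have := (prv_spec h0).1; omega⟩

lemma rnk_even_of_unconsumed {cs : List Char} {k : Nat} (hk : k < cs.length)
    (hdg : dg (chD cs k) = true) (hnc : consumed cs k k = false) : rnk cs k % 2 = 0 := by
  by_contra hpar
  have h0 := rnk_pos_of_odd (cs := cs) (j := k) (by omega)
  have : consumed cs k k = true := by
    rw [consumed_char hk, if_neg hpar]
    exact ⟨hdg, (prv_spec h0).1⟩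
  simp [this] at hnc

lemma nxt_unconsumed {cs : List Char} {k c : Nat} (hk : k < cs.length)
    (hnc : consumed cs k k = false) (hdg : dg (chD cs k) = true) (hc : nxt cs k = some c) :
    consumed cs k c = false := by
  rcases nxt_some hc with ⟨hkc, hcn, _, _⟩
  have heven := rnk_even_of_unconsumed hk hdg hnc
  have hr := rnk_succ_of_nxt hc
  by_contra hcon
  rw [Bool.not_eq_false, consumed_char hcn, if_neg (by omega)] at hcon
  rw [prv_nxt hc] at hcon
  omega

-- ---------- A-side: the loops ----------

def bodyI (s : String) (k : Int) (st : List Int × List (List Int)) (l : Int) :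
    List Int × List (List Int) :=
  if k ∈ st.1 ∧ l ∈ st.1 ∧ k ≠ l then
    if PySem.Str.pyGet? s k = PySem.Str.pyGet? s l then
      (((PySem.List.remove? st.1 k).getD st.1 |> fun r => (PySem.List.remove? r l).getD r),
       st.2 ++ [[k, l]])
    else st
  else st

def bodyO (s : String) (st : List Int × List (List Int)) (k : Int) :
    List Int × List (List Int) :=
  (PySem.List.pyRange 0 (PySem.Str.len s) 1).foldl (bodyI s k) st

lemma get_ring_pairs_eq (s : String) :
    get_ring_pairs s =
      ((PySem.List.pyRange 0 (PySem.Str.len s) 1).foldl (bodyO s) (get_ring_indexes s, [])).2 := by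
  rfl

lemma inner_noop {s : String} {k : Int} {L : List Int} {R : List Int} {P : List (List Int)}
    (h : k ∉ R) : L.foldl (bodyI s k) (R, P) = (R, P) := by
  induction L with
  | nil => rfl
  | cons l L ih =>
    have hb : bodyI s k (R, P) l = (R, P) := by
      unfold bodyI
      simp [h]
    rw [List.foldl_cons, hb, ih]

lemma inner_run {s : String} {k : Int} {L : List Int} {R : List Int} {P : List (List Int)}
    (hnd : R.Nodup) (hk : k ∈ R) :
    L.foldl (bodyI s k) (R, P) =
      match L.find? (fun l => decide (l ∈ R ∧ k ≠ l ∧ PySem.Str.pyGet? s k = PySem.Str.pyGet? s l)) with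
      | some l0 => ((R.erase k).erase l0, P ++ [[k, l0]])
      | none => (R, P) := by
  induction L with
  | nil => rfl
  | cons l L ih =>
    rw [List.foldl_cons, List.find?_cons]
    by_cases hp : l ∈ R ∧ k ≠ l ∧ PySem.Str.pyGet? s k = PySem.Str.pyGet? s l
    · simp only [decide_eq_true hp]
      have hb : bodyI s k (R, P) l = ((R.erase k).erase l, P ++ [[k, l]]) := by
        unfold bodyI
        rw [if_pos ⟨hk, hp.1, hp.2.1⟩, if_pos hp.2.2]
        simp [remove?_getD]
      rw [hb]
      apply inner_noop
      intro hmem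
      exact (hnd.not_mem_erase) (List.mem_of_mem_erase hmem)
    · simp only [decide_eq_false hp]
      have hb : bodyI s k (R, P) l = (R, P) := by
        unfold bodyI
        split_ifs with h1 h2
        · exact absurd ⟨h1.2.1, h1.2.2, h2⟩ hp
        · rfl
        · rfl
      rw [hb, ih]

lemma ring_indexes_eq {s : String} (h : pvDomStr s = true) :
    get_ring_indexes s = Rst s.toList 0 := by
  unfold get_ring_indexes
  rw [PySem.List.enumerate_eq_map_pyRange s.toList ' ', PySem.List.pyRange_one]
  simp only [PySem.List.len_eq, Int.toNat_natCast, List.map_map, zero_add, Int.sub_zero]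
  rw [List.foldl_map]
  simp only [Function.comp_def, PySem.List.pyGetD_natCast]
  have hcg : ∀ (acc : List Int), ∀ i ∈ List.range s.toList.length,
      (fun (acc : List Int) (i : Nat) =>
        match PySem.Int.ofStr? (String.ofList [s.toList.getD i ' ']) with
        | some _ => acc ++ [(i:Int)]
        | none => acc) acc i =
      (fun (acc : List Int) (i : Nat) =>
        if dg (s.toList.getD i ' ') then acc ++ [(i:Int)] else acc) acc i := by
    intro acc i hi
    have this2 : (PySem.Int.ofStr? (String.ofList [s.toList.getD i ' '])).isSome
        = dg (s.toList.getD i ' ') := digA (domChD h i)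
    rcases ho : PySem.Int.ofStr? (String.ofList [s.toList.getD i ' ']) with _ | v
    · rw [ho] at this2
      simp only [ho]
      rw [if_neg (by rw [← this2]; simp)]
    · rw [ho] at this2
      simp only [ho]
      rw [if_pos (by rw [← this2]; simp)]
  rw [PySem.List.foldl_congr_mem _ _ _ _ hcg]
  rw [PySem.List.foldl_append_if]
  unfold Rst RstN
  rw [List.nil_append]
  congr 1
  apply List.filter_congr
  intro i hi
  simp [consumed, chD]

-- the inner scan finds exactly the next unconsumed same-digit position
lemma find_some {s : String} {k c : Nat} (hdom : pvDomStr s = true) (hk : k < s.toList.length)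
    (hdg : dg (chD s.toList k) = true) (hnc : consumed s.toList k k = false)
    (hc : nxt s.toList k = some c) :
    (PySem.List.pyRange 0 (PySem.Str.len s) 1).find?
        (fun l => decide (l ∈ Rst s.toList k ∧ (k:Int) ≠ l ∧
          PySem.Str.pyGet? s k = PySem.Str.pyGet? s l)) = some (c:Int) := by
  rcases nxt_some hc with ⟨hkc, hcn, hcc, hmin⟩
  rw [PySem.Str.len_eq, PySem.List.pyRange_one]
  simp only [zero_add, Int.sub_zero, Int.toNat_natCast]
  rw [List.find?_map]
  have hf : (List.range s.toList.length).find?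
      ((fun l => decide (l ∈ Rst s.toList k ∧ (k:Int) ≠ l ∧
        PySem.Str.pyGet? s k = PySem.Str.pyGet? s l)) ∘ (fun m : Nat => (m:Int))) = some c := by
    apply find?_range_some.mpr
    refine ⟨hcn, ?_, ?_⟩
    · simp only [Function.comp_apply, decide_eq_true_eq]
      refine ⟨?_, ?_, ?_⟩
      · exact mem_Rst.mpr ⟨c, rfl,
          mem_RstN.mpr ⟨hcn, by rw [hcc]; exact hdg, nxt_unconsumed hk hnc hdg hc⟩⟩
      · intro he
        have : k = c := by exact_mod_cast he
        omega
      · rw [PySem.Str.pyGet?_natCast, PySem.Str.pyGet?_natCast, get?_chD hk, get?_chD hcn, hcc]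
    · intro m hm
      simp only [Function.comp_apply]
      apply decide_eq_false
      rintro ⟨hmem, hne, hch⟩
      rcases mem_Rst.mp hmem with ⟨i, hcast, hiR⟩
      have hmi : m = i := by exact_mod_cast hcast
      subst hmi
      rcases mem_RstN.mp hiR with ⟨hmn, hdgm, hconm⟩
      have hkm : k ≠ m := by intro he; exact hne (by exact_mod_cast he)
      rw [PySem.Str.pyGet?_natCast, PySem.Str.pyGet?_natCast, get?_chD hk, get?_chD hmn] at hch
      have hchm : chD s.toList m = chD s.toList k := (Option.some_inj.mp hch).symm
      rcases Nat.lt_trichotomy m k with h1 | h1 | h1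
      · rw [survivor_lt hk hdg hnc h1 hchm] at hconm
        exact absurd hconm (by simp)
      · exact hkm h1.symm
      · exact hmin m h1 hm hchm
  rw [hf]
  rfl

lemma find_none {s : String} {k : Nat} (hdom : pvDomStr s = true) (hk : k < s.toList.length)
    (hdg : dg (chD s.toList k) = true) (hnc : consumed s.toList k k = false)
    (hc : nxt s.toList k = none) :
    (PySem.List.pyRange 0 (PySem.Str.len s) 1).find?
        (fun l => decide (l ∈ Rst s.toList k ∧ (k:Int) ≠ l ∧
          PySem.Str.pyGet? s k = PySem.Str.pyGet? s l)) = none := by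
  rw [PySem.Str.len_eq, PySem.List.pyRange_one]
  simp only [zero_add, Int.sub_zero, Int.toNat_natCast]
  rw [List.find?_map]
  have hf : (List.range s.toList.length).find?
      ((fun l => decide (l ∈ Rst s.toList k ∧ (k:Int) ≠ l ∧
        PySem.Str.pyGet? s k = PySem.Str.pyGet? s l)) ∘ (fun m : Nat => (m:Int))) = none := by
    apply List.find?_eq_none.mpr
    intro m hmr
    simp only [Function.comp_apply]
    simp only [Bool.not_eq_true]
    apply decide_eq_false
    rintro ⟨hmem, hne, hch⟩
    rcases mem_Rst.mp hmem with ⟨i, hcast, hiR⟩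
    have hmi : m = i := by exact_mod_cast hcast
    subst hmi
    rcases mem_RstN.mp hiR with ⟨hmn, hdgm, hconm⟩
    have hkm : k ≠ m := by intro he; exact hne (by exact_mod_cast he)
    rw [PySem.Str.pyGet?_natCast, PySem.Str.pyGet?_natCast, get?_chD hk, get?_chD hmn] at hch
    have hchm : chD s.toList m = chD s.toList k := (Option.some_inj.mp hch).symm
    rcases Nat.lt_trichotomy m k with h1 | h1 | h1
    · rw [survivor_lt hk hdg hnc h1 hchm] at hconm
      exact absurd hconm (by simp)
    · exact hkm h1.symm
    · exact nxt_none hc m hmn h1 hchm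
  rw [hf]
  rfl

lemma Rst_succ_noopen {cs : List Char} {k : Nat} (h : opn cs k = false) :
    Rst cs (k+1) = Rst cs k := by
  unfold Rst RstN
  congr 1
  apply List.filter_congr
  intro i hi
  rw [consumed_succ, h]
  simp

lemma Rst_succ_open {cs : List Char} {k c : Nat} (hopn : opn cs k = true)
    (hc : nxt cs k = some c) :
    ((Rst cs k).erase (k:Int)).erase (c:Int) = Rst cs (k+1) := by
  have hnd : (Rst cs k).Nodup := nodup_Rst
  rw [List.Nodup.erase_eq_filter hnd (k:Int)]
  rw [List.Nodup.erase_eq_filter (hnd.filter _) (c:Int)]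
  rw [List.filter_filter]
  unfold Rst RstN
  rw [List.filter_map]
  congr 1
  rw [List.filter_filter]
  apply List.filter_congr
  intro i hi
  simp only [Function.comp_def, consumed_succ, hopn, hc, Bool.true_and]
  have h1 : ((i:Int) != (c:Int)) = !(c == i) := by
    simp [bne, beq_eq_decide, Nat.cast_inj, eq_comm]
  have h2 : ((i:Int) != (k:Int)) = !(k == i) := by
    simp [bne, beq_eq_decide, Nat.cast_inj, eq_comm]
  have h3 : (some c == some i) = (c == i) := by simp [beq_eq_decide]
  rw [h1, h2, h3]
  cases dg (chD cs i) <;> cases consumed cs k i <;>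
    cases hci : (c == i) <;> cases hki : (k == i) <;> simp

lemma specFrom_stop {cs : List Char} : specFrom cs cs.length = [] := by
  simp [specFrom]

lemma specFrom_cons {cs : List Char} {k : Nat} (hk : k < cs.length) :
    specFrom cs k = (pairAt cs k).toList ++ specFrom cs (k+1) := by
  unfold specFrom
  have h1 : cs.length - k = (cs.length - (k+1)) + 1 := by omega
  rw [h1, List.range'_succ]
  cases h : pairAt cs k <;> simp [h]

lemma outer_loop {s : String} (hdom : pvDomStr s = true) :
    ∀ m k, k + m = s.toList.length → ∀ P : List (List Int),
      (List.range' k m).foldl (fun st (kn : Nat) => bodyO s st (kn : Int)) (Rst s.toList k, P) =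
        (Rst s.toList s.toList.length, P ++ specFrom s.toList k) := by
  intro m
  induction m with
  | zero =>
    intro k hk P
    have hkn : k = s.toList.length := by omega
    subst hkn
    rw [show List.range' s.toList.length 0 = [] from rfl, List.foldl_nil, specFrom_stop,
      List.append_nil]
  | succ m ih =>
    intro k hkm P
    have hk : k < s.toList.length := by omega
    rw [List.range'_succ, List.foldl_cons]
    by_cases hmem : k ∈ RstN s.toList k
    · rcases mem_RstN.mp hmem with ⟨_, hdg, hnc⟩
      have hkInt : (k:Int) ∈ Rst s.toList k := List.mem_map.mpr ⟨k, hmem, rfl⟩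
      cases hnx : nxt s.toList k with
      | some c =>
        have hopn : opn s.toList k = true := by
          unfold opn
          simp [hdg, rnk_even_of_unconsumed hk hdg hnc, hnx]
        have heq : bodyO s (Rst s.toList k, P) (k:Int) =
            (Rst s.toList (k+1), P ++ [[(k:Int), (c:Int)]]) := by
          unfold bodyO
          rw [inner_run nodup_Rst hkInt, find_some hdom hk hdg hnc hnx]
          simp only [Rst_succ_open hopn hnx]
        rw [heq, ih (k+1) (by omega) (P ++ [[(k:Int), (c:Int)]])]
        have hpa : pairAt s.toList k = some [(k:Int), (c:Int)] := by
          unfold pairAt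
          rw [if_pos hopn, hnx]
          rfl
        rw [specFrom_cons hk, hpa]
        simp
      | none =>
        have hopn : opn s.toList k = false := by
          unfold opn
          simp [hnx]
        have heq : bodyO s (Rst s.toList k, P) (k:Int) = (Rst s.toList k, P) := by
          unfold bodyO
          rw [inner_run nodup_Rst hkInt, find_none hdom hk hdg hnc hnx]
        have hpa : pairAt s.toList k = none := by
          unfold pairAt
          rw [if_neg (by simp [hopn])]
        rw [heq, ← Rst_succ_noopen hopn, ih (k+1) (by omega) P]
        rw [specFrom_cons hk, hpa]
        simp
    · have hkInt : (k:Int) ∉ Rst s.toList k := by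
        intro hin
        rcases List.mem_map.mp hin with ⟨i, hi, he⟩
        have : i = k := by exact_mod_cast he
        subst this
        exact hmem hi
      have hopn : opn s.toList k = false := by
        by_cases hdg : dg (chD s.toList k) = true
        · have hcon : consumed s.toList k k = true := by
            by_contra hc
            exact hmem (mem_RstN.mpr ⟨hk, hdg, by simpa using hc⟩)
          have hodd : rnk s.toList k % 2 = 1 := by
            by_contra hpar
            rw [consumed_char hk, if_pos (by omega)] at hcon
            omega
          unfold opn
          simp
          intro _ h2
          omega
        · unfold opn
          simp only [Bool.and_eq_false_iff]
          left; left
          simpa using hdg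
      have heq : bodyO s (Rst s.toList k, P) (k:Int) = (Rst s.toList k, P) := by
        unfold bodyO
        exact inner_noop hkInt
      have hpa : pairAt s.toList k = none := by
        unfold pairAt
        rw [if_neg (by simp [hopn])]
      rw [heq, ← Rst_succ_noopen hopn, ih (k+1) (by omega) P]
      rw [specFrom_cons hk, hpa]
      simp

lemma sA {s : String} (hdom : pvDomStr s = true) :
    get_ring_pairs s = specFrom s.toList 0 := by
  rw [get_ring_pairs_eq, ring_indexes_eq hdom]
  rw [PySem.Str.len_eq, PySem.List.pyRange_one]
  simp only [zero_add, Int.sub_zero, Int.toNat_natCast]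
  rw [List.foldl_map]
  rw [List.range_eq_range']
  rw [outer_loop hdom s.toList.length 0 (by omega) []]
  simp

-- ---------- B-side ----------

def bodyB (st : PySem.Dict Char Int × PySem.Dict Int Int) (ic : Int × Char) :
    PySem.Dict Char Int × PySem.Dict Int Int :=
  if PySem.Str.strIsdigit (String.ofList [ic.2]) then
    match PySem.Dict.get? st.1 ic.2 with
    | some p => (PySem.Dict.erase st.1 ic.2, PySem.Dict.insert st.2 p ic.1)
    | none => (PySem.Dict.insert st.1 ic.2 ic.1, st.2)
  else st

lemma get_ring_pairs_alt_eq (s : String) :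
    get_ring_pairs_alt s =
      (PySem.List.pyRange 0 (PySem.Str.len s) 1).foldl
        (fun acc i =>
          match PySem.Dict.get?
              ((PySem.List.enumerate s.toList).foldl bodyB
                (PySem.Dict.empty, PySem.Dict.empty)).2 i with
          | some j => acc ++ [[i, j]]
          | none => acc) [] := by
  rfl

lemma pend_unique {cs : List Char} {m i i' : Nat} (hm : m ≤ cs.length) (hi : i < m) (hi' : i' < m)
    (hp : pend cs m i = true) (hp' : pend cs m i' = true) (hc : chD cs i = chD cs i') :
    i = i' := by
  have hgen : ∀ a b : Nat, a < m → b < m → pend cs m a = true → chD cs a = chD cs b → a < b → False := by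
    intro a b ha hb hpa hcab hab
    have hbn : b < cs.length := by omega
    have hsome := nxt_isSome_of_exists hbn hab hcab.symm
    rcases ho : nxt cs a with _ | j
    · rw [ho] at hsome; simp at hsome
    · rcases nxt_some ho with ⟨haj, hjn, hcj, hmin⟩
      have hjb : j ≤ b := by
        by_contra hgt
        exact hmin b hab (by omega) hcab.symm
      unfold pend at hpa
      rw [ho] at hpa
      simp at hpa
      omega
  rcases Nat.lt_trichotomy i i' with h1 | h1 | h1
  · exact absurd (hgen i i' hi hi' hp hc h1) (by simp)
  · exact h1
  · exact absurd (hgen i' i hi' hi hp' hc.symm h1) (by simp)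

lemma pend_mono {cs : List Char} {m i : Nat} (h : pend cs (m+1) i = true) : pend cs m i = true := by
  unfold pend at h ⊢
  simp only [Bool.and_eq_true] at h ⊢
  refine ⟨h.1, ?_⟩
  rcases ho : nxt cs i with _ | j <;> rw [ho] at h <;> simp_all
  omega

lemma pend_step {cs : List Char} {m i : Nat} (hne : nxt cs i ≠ some m) :
    pend cs (m+1) i = pend cs m i := by
  unfold pend
  rcases ho : nxt cs i with _ | j
  · rfl
  · have hjm : j ≠ m := fun he => hne (he ▸ ho)
    congr 1
    simp only [Option.all_some]
    apply decide_eq_decide.mpr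
    omega

lemma pend_succ_self_even {cs : List Char} {m : Nat} (hdg : dg (chD cs m) = true)
    (heven : rnk cs m % 2 = 0) : pend cs (m+1) m = true := by
  unfold pend
  rcases ho : nxt cs m with _ | j
  · simp [hdg, Option.all]
    omega
  · have := (nxt_some ho).1
    simp [hdg, Option.all_some]
    omega

lemma no_pend_match {cs : List Char} {m : Nat} (hmlt : m < cs.length)
    (heven : rnk cs m % 2 = 0) :
    ∀ j < m, ¬(pend cs m j = true ∧ chD cs j = chD cs m) := by
  rintro j hjm ⟨hpj, hcj⟩
  have hsome := nxt_isSome_of_exists hmlt hjm hcj.symm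
  rcases ho : nxt cs j with _ | t
  · rw [ho] at hsome; simp at hsome
  · rcases nxt_some ho with ⟨hjt, htn, hct, hmin2⟩
    have htm : t ≤ m := by
      by_contra hgt
      exact hmin2 m hjm (by omega) hcj.symm
    unfold pend at hpj
    rw [ho] at hpj
    simp only [Option.all_some, Bool.and_eq_true, decide_eq_true_eq, beq_iff_eq] at hpj
    have htm2 : t = m := by omega
    subst htm2
    have hre := rnk_succ_of_nxt ho
    omega

lemma pnd_succ_odd {cs : List Char} {m : Nat} (hmlt : m < cs.length)
    (hdg : dg (chD cs m) = true) (hodd : rnk cs m % 2 = 1) :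
    List.filter (fun p => !(p.1 == chD cs m)) (pndItems cs m) = pndItems cs (m+1) := by
  have h0 := rnk_pos_of_odd hodd
  have hnp := nxt_prv hmlt h0
  rcases prv_spec h0 with ⟨hplt, hcp, _⟩
  have hrp := rnk_succ_of_nxt hnp
  have hpend : pend cs m (prv cs m) = true := by
    unfold pend
    rw [hnp]
    simp only [Option.all_some, Bool.and_eq_true, decide_eq_true_eq, beq_iff_eq]
    exact ⟨⟨by rw [hcp]; exact hdg, by omega⟩, by omega⟩
  unfold pndItems
  rw [List.filter_map, List.filter_filter]
  rw [List.range_succ, List.filter_append]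
  have hmf : List.filter (pend cs (m+1)) [m] = [] := by
    have : pend cs (m+1) m = false := by
      unfold pend
      simp only [Bool.and_eq_false_iff]
      left; right
      apply beq_eq_false_iff_ne.mpr
      omega
    simp [this]
  rw [hmf, List.append_nil]
  congr 1
  apply List.filter_congr
  intro i hir
  have hi := List.mem_range.mp hir
  simp only [Function.comp_def]
  by_cases hci : chD cs i = chD cs m
  · have hlhs : pend cs (m+1) i = false := by
      by_cases hpi : pend cs m i = true
      · have hip : i = prv cs m :=
          pend_unique (by omega) hi hplt hpi hpend (by rw [hci, ← hcp])
        subst hip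
        unfold pend
        rw [hnp]
        simp only [Option.all_some, Bool.and_eq_false_iff]
        right
        simp
      · exact Bool.eq_false_iff.mpr (fun h => hpi (pend_mono h))
    rw [hlhs]
    simp [hci]
  · have hstep : pend cs (m+1) i = pend cs m i :=
      pend_step (fun he => hci ((nxt_some he).2.2.1.symm))
    rw [hstep]
    simp [beq_eq_false_iff_ne.mpr hci]

lemma ptn_succ_odd {cs : List Char} {m : Nat}
    (hdg : dg (chD cs m) = true) (hodd : rnk cs m % 2 = 1) :
    ptnItems cs (m+1) = ptnItems cs m ++ [(((prv cs m : Nat) : Int), ((m:Nat):Int))] := by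
  unfold ptnItems
  rw [List.range_succ, List.filter_append, List.map_append]
  congr 1
  simp [hdg, hodd]

lemma ptn_fresh {cs : List Char} {m : Nat} (hmlt : m < cs.length)
    (hodd : rnk cs m % 2 = 1) :
    PySem.Dict.contains (PySem.Dict.mk (ptnItems cs m)) (((prv cs m : Nat) : Int)) = false := by
  have h0 := rnk_pos_of_odd hodd
  have hnp := nxt_prv hmlt h0
  by_contra hc
  rw [Bool.not_eq_false, PySem.Dict.contains_iff_mem_keys, PySem.Dict.keys_mk] at hc
  unfold ptnItems at hc
  rw [List.map_map] at hc
  rcases List.mem_map.mp hc with ⟨j, hjf, hje⟩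
  have hj := List.mem_filter.mp hjf
  have hjr := List.mem_range.mp hj.1
  simp only [Function.comp_def] at hje
  have hpe : prv cs j = prv cs m := by exact_mod_cast hje
  have hjodd : rnk cs j % 2 = 1 := by
    have := hj.2
    simp only [Bool.and_eq_true, beq_iff_eq] at this
    exact this.2
  have h0j := rnk_pos_of_odd hjodd
  have hj2 := nxt_prv (show j < cs.length by omega) h0j
  rw [hpe, hnp] at hj2
  have : m = j := by simpa using hj2
  omega

lemma pnd_succ_even {cs : List Char} {m : Nat} (hmlt : m < cs.length)
    (hdg : dg (chD cs m) = true) (heven : rnk cs m % 2 = 0) :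
    pndItems cs (m+1) = pndItems cs m ++ [(chD cs m, ((m:Nat):Int))] := by
  have hnof := no_pend_match hmlt heven
  unfold pndItems
  rw [List.range_succ, List.filter_append]
  have h1 : List.filter (pend cs (m+1)) [m] = [m] := by
    simp [pend_succ_self_even hdg heven]
  rw [h1, List.map_append]
  congr 2
  apply List.filter_congr
  intro i hir
  have hi := List.mem_range.mp hir
  by_cases hci : chD cs i = chD cs m
  · have hpi : pend cs m i = false := by
      by_contra h
      rw [Bool.not_eq_false] at h
      exact hnof i hi ⟨h, hci⟩
    have hl : pend cs (m+1) i = false :=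
      Bool.eq_false_iff.mpr (fun h => by rw [pend_mono h] at hpi; cases hpi)
    rw [hl, hpi]
  · exact pend_step (fun he => hci ((nxt_some he).2.2.1.symm))

lemma ptn_succ_noopen {cs : List Char} {m : Nat}
    (h : (dg (chD cs m) && (rnk cs m % 2 == 1)) = false) :
    ptnItems cs (m+1) = ptnItems cs m := by
  unfold ptnItems
  rw [List.range_succ, List.filter_append]
  simp [h]

lemma pnd_succ_nodigit {cs : List Char} {m : Nat} (hdgf : dg (chD cs m) = false) :
    pndItems cs (m+1) = pndItems cs m := by
  unfold pndItems
  rw [List.range_succ, List.filter_append]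
  have h1 : List.filter (pend cs (m+1)) [m] = [] := by
    have : pend cs (m+1) m = false := by
      unfold pend
      simp [hdgf]
    simp [this]
  rw [h1, List.append_nil]
  congr 1
  apply List.filter_congr
  intro i hir
  by_cases hci : chD cs i = chD cs m
  · have hl : pend cs (m+1) i = false := by
      unfold pend
      simp [hci, hdgf]
    have hr : pend cs m i = false := by
      unfold pend
      simp [hci, hdgf]
    rw [hl, hr]
  · exact pend_step (fun he => hci ((nxt_some he).2.2.1.symm))

lemma b_loop {s : String} (hdom : pvDomStr s = true) :
    ∀ m, m ≤ s.toList.length →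
      (List.range m).foldl (fun st (i : Nat) => bodyB st ((i:Int), s.toList.getD i ' '))
          (PySem.Dict.empty, PySem.Dict.empty) =
        (PySem.Dict.mk (pndItems s.toList m), PySem.Dict.mk (ptnItems s.toList m)) := by
  intro m
  induction m with
  | zero => intro _; rfl
  | succ m ih =>
    intro hm1
    have hm : m ≤ s.toList.length := by omega
    have hmlt : m < s.toList.length := by omega
    rw [List.range_succ, List.foldl_append, ih hm, List.foldl_cons, List.foldl_nil]
    have hgd : s.toList.getD m ' ' = chD s.toList m := rfl
    unfold bodyB
    simp only [hgd]
    rw [digB (domChD hdom m)]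
    by_cases hdg : dg (chD s.toList m) = true
    · rw [if_pos hdg]
      have hget : PySem.Dict.get? (PySem.Dict.mk (pndItems s.toList m)) (chD s.toList m) =
          if rnk s.toList m % 2 = 1 then some ((prv s.toList m : Nat) : Int) else none := by
        have hit : (PySem.Dict.mk (pndItems s.toList m)).items = pndItems s.toList m := rfl
        unfold PySem.Dict.get?
        rw [hit]
        unfold pndItems
        rw [List.find?_map, List.find?_filter]
        simp only [Function.comp_def, Bool.decide_and, Bool.decide_eq_true]
        by_cases hodd : rnk s.toList m % 2 = 1
        · have h0 := rnk_pos_of_odd hodd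
          have hnp := nxt_prv hmlt h0
          rcases prv_spec h0 with ⟨hplt, hcp, _⟩
          have hrp := rnk_succ_of_nxt hnp
          have hpend : pend s.toList m (prv s.toList m) = true := by
            unfold pend
            rw [hnp]
            simp only [Option.all_some, Bool.and_eq_true, decide_eq_true_eq, beq_iff_eq]
            refine ⟨⟨by rw [hcp]; exact hdg, by omega⟩, by omega⟩
          have hff : (List.range m).find?
              (fun a => pend s.toList m a && (chD s.toList a == chD s.toList m)) =
              some (prv s.toList m) := by
            apply find?_range_some.mpr
            refine ⟨hplt, by simp [hpend, hcp], fun j hj => ?_⟩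

            by_cases hpj : pend s.toList m j = true
            · simp only [hpj, Bool.true_and]
              apply beq_eq_false_iff_ne.mpr
              intro hcj
              have := pend_unique hm (by omega) hplt hpj hpend (by rw [hcj, hcp])
              omega
            · simp [Bool.eq_false_iff.mpr hpj]
          simp only [hff, if_pos hodd]
          rfl
        · have hff : (List.range m).find?
              (fun a => pend s.toList m a && (chD s.toList a == chD s.toList m)) =
              none := by
            apply List.find?_eq_none.mpr
            intro j hjr hx
            rw [Bool.and_eq_true] at hx
            rcases hx with ⟨hpj, hcj⟩
            rw [beq_iff_eq] at hcj
            exact no_pend_match hmlt (by omega) j (List.mem_range.mp hjr) ⟨hpj, hcj⟩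
          simp only [hff, if_neg hodd]
          rfl
      by_cases hodd : rnk s.toList m % 2 = 1
      · rw [hget, if_pos hodd]
        refine Prod.ext ?_ ?_
        · apply PySem.Dict.ext
          exact pnd_succ_odd hmlt hdg hodd
        · apply PySem.Dict.ext
          rw [PySem.Dict.items_insert_of_not_contains _ _ (ptn_fresh hmlt hodd)]
          exact (ptn_succ_odd hdg hodd).symm
      · rw [hget, if_neg hodd]
        have hcont : PySem.Dict.contains (PySem.Dict.mk (pndItems s.toList m))
            (chD s.toList m) = false := by
          rw [PySem.Dict.contains_eq_isSome_get?, hget, if_neg hodd]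
          rfl
        refine Prod.ext ?_ ?_
        · apply PySem.Dict.ext
          rw [PySem.Dict.items_insert_of_not_contains _ _ hcont]
          exact (pnd_succ_even hmlt hdg (by omega)).symm
        · apply PySem.Dict.ext
          exact (ptn_succ_noopen (by simp [beq_eq_false_iff_ne.mpr hodd])).symm
    · rw [if_neg hdg]
      have hdgf : dg (chD s.toList m) = false := Bool.eq_false_iff.mpr hdg
      refine Prod.ext ?_ ?_
      · apply PySem.Dict.ext
        exact (pnd_succ_nodigit hdgf).symm
      · apply PySem.Dict.ext
        exact (ptn_succ_noopen (by simp [hdgf])).symm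

lemma get?_ptn {cs : List Char} {i : Nat} (hi : i < cs.length) :
    PySem.Dict.get? (PySem.Dict.mk (ptnItems cs cs.length)) (((i:Nat):Int)) =
      (nxt cs i).bind (fun c => if opn cs i then some ((c:Nat):Int) else none) := by
  have hit : (PySem.Dict.mk (ptnItems cs cs.length)).items = ptnItems cs cs.length := rfl
  unfold PySem.Dict.get?
  rw [hit]
  unfold ptnItems
  rw [List.find?_map, List.find?_filter]
  simp only [Function.comp_def, Bool.decide_and, Bool.decide_eq_true]
  by_cases hopn : opn cs i = true
  · have hop : dg (chD cs i) = true ∧ rnk cs i % 2 = 0 ∧ (nxt cs i).isSome = true := by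
      unfold opn at hopn
      simp at hopn
      exact ⟨hopn.1.1, hopn.1.2, hopn.2⟩
    rcases ho : nxt cs i with _ | c
    · rw [ho] at hop
      simp at hop
    · rcases nxt_some ho with ⟨hic, hcn, hcc, hmin⟩
      have hrc := rnk_succ_of_nxt ho
      have hpc := prv_nxt ho
      have hff : (List.range cs.length).find?
          (fun a => (dg (chD cs a) && (rnk cs a % 2 == 1)) && (((prv cs a : Nat):Int) == ((i:Nat):Int))) = some c := by
        apply find?_range_some.mpr
        refine ⟨hcn, ?_, ?_⟩
        · simp only [Bool.and_eq_true, beq_iff_eq]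
          refine ⟨⟨by rw [hcc]; exact hop.1, by omega⟩, by rw [hpc]⟩
        · intro j hj
          by_cases hdj : (dg (chD cs j) && (rnk cs j % 2 == 1)) = true
          · simp only [hdj, Bool.true_and]
            apply beq_eq_false_iff_ne.mpr
            intro hje
            have hpji : prv cs j = i := by exact_mod_cast hje
            have hjodd : rnk cs j % 2 = 1 := by
              simp only [Bool.and_eq_true, beq_iff_eq] at hdj
              exact hdj.2
            have h0j := rnk_pos_of_odd hjodd
            have hnj := nxt_prv (show j < cs.length by omega) h0j
            rw [hpji, ho] at hnj
            have : c = j := by simpa using hnj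
            omega
          · simp [Bool.eq_false_iff.mpr hdj]
      rw [hff]
      simp [hopn]
  · have hof : opn cs i = false := Bool.eq_false_iff.mpr hopn
    have hff : (List.range cs.length).find?
        (fun a => (dg (chD cs a) && (rnk cs a % 2 == 1)) && (((prv cs a : Nat):Int) == ((i:Nat):Int))) = none := by
      apply List.find?_eq_none.mpr
      intro j hjr hx
      simp only [Bool.and_eq_true, beq_iff_eq] at hx
      rcases hx with ⟨⟨hdj, hjodd⟩, hje⟩
      have hpji : prv cs j = i := by exact_mod_cast hje
      have h0j := rnk_pos_of_odd hjodd
      have hnj := nxt_prv (List.mem_range.mp hjr) h0j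
      rw [hpji] at hnj
      rcases prv_spec h0j with ⟨_, hcpj, _⟩
      rw [hpji] at hcpj
      have hrj := rnk_succ_of_nxt hnj
      have : opn cs i = true := by
        unfold opn
        simp only [hnj, Option.isSome_some, Bool.and_true, Bool.and_eq_true, beq_iff_eq]
        exact ⟨by rw [hcpj]; exact hdj, by omega⟩
      exact hopn this
    rw [hff]
    rcases ho : nxt cs i with _ | c <;> simp [hof]

lemma sB {s : String} (hdom : pvDomStr s = true) :
    get_ring_pairs_alt s = specFrom s.toList 0 := by
  rw [get_ring_pairs_alt_eq]
  have hD : ((PySem.List.enumerate s.toList).foldl bodyB (PySem.Dict.empty, PySem.Dict.empty)).2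
      = PySem.Dict.mk (ptnItems s.toList s.toList.length) := by
    rw [PySem.List.enumerate_eq_map_pyRange s.toList ' ', PySem.List.pyRange_one]
    simp only [PySem.List.len_eq, Int.toNat_natCast, List.map_map, zero_add, Int.sub_zero]
    rw [List.foldl_map]
    simp only [Function.comp_def, PySem.List.pyGetD_natCast]
    rw [b_loop hdom s.toList.length (le_refl _)]
  simp only [hD]
  rw [PySem.Str.len_eq, PySem.List.pyRange_one]
  simp only [zero_add, Int.sub_zero, Int.toNat_natCast]
  rw [List.foldl_map]
  have hcg : ∀ (acc : List (List Int)), ∀ i ∈ List.range s.toList.length,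
      (fun (acc : List (List Int)) (i : Nat) =>
        match PySem.Dict.get? (PySem.Dict.mk (ptnItems s.toList s.toList.length)) ((i:Nat):Int) with
        | some j => acc ++ [[((i:Nat):Int), j]]
        | none => acc) acc i =
      (fun (acc : List (List Int)) (i : Nat) => acc ++ (pairAt s.toList i).toList) acc i := by
    intro acc i hir
    have hi := List.mem_range.mp hir
    simp only [get?_ptn hi]
    rcases ho : nxt s.toList i with _ | c
    · have hopnf : opn s.toList i = false := by
        unfold opn
        simp [ho]
      simp [pairAt, hopnf]
    · by_cases hopn : opn s.toList i = true
      · simp [hopn, pairAt, ho]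
      · have hof : opn s.toList i = false := Bool.eq_false_iff.mpr hopn
        simp [pairAt, hof]
  rw [PySem.List.foldl_congr_mem _ _ _ _ hcg]
  rw [filterMap_eq_foldl_toList]
  simp [specFrom, List.range_eq_range']


-- ===== VERDICT (by name: the statement is the Claim_ definition above) =====
theorem get_ring_pairs_spec : Claim_equal_get_ring_pairs := by
  intro s hdom
  unfold Spec_get_ring_pairs
  rw [sA hdom, sB hdom]
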